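-- pv_equiv track=rewrite | github.com/avras/bp-ed25519 | python/verify_point_addition.py | quadratic_term_subscripts_unequal_lengths
-- ===== SOURCE A (Python) =====
-- def quadratic_term_subscripts_unequal_lengths(num_limbs1, num_limbs2):
--     max_limb_degree_in_quadratic = num_limbs1+num_limbs2-2
--     subscript_sets = []
--     for i in range(max_limb_degree_in_quadratic+1):
--         subscript_sets.append(set())
--
--     for i in range(num_limbs1):
--         for j in range(num_limbs2):
--                 subscript_sets[i+j].add((i,j))
--
--     return subscript_sets
-- ===== SOURCE B (Python) =====
-- def quadratic_term_subscripts_unequal_lengths(num_limbs1, num_limbs2):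
--     return [{(i, k - i) for i in range(max(0, k - num_limbs2 + 1), min(k, num_limbs1 - 1) + 1)}
--             for k in range(num_limbs1 + num_limbs2 - 1)]
-- ===== Notes on version B (the rewrite author's own statement) =====
-- stated objective: simpler
-- what changed: B builds each diagonal bucket directly as a comprehension over the degree sum k with closed-form index bounds, instead of preallocating empty sets and scattering (i,j) pairs via a double loop.
import Mathlib
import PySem

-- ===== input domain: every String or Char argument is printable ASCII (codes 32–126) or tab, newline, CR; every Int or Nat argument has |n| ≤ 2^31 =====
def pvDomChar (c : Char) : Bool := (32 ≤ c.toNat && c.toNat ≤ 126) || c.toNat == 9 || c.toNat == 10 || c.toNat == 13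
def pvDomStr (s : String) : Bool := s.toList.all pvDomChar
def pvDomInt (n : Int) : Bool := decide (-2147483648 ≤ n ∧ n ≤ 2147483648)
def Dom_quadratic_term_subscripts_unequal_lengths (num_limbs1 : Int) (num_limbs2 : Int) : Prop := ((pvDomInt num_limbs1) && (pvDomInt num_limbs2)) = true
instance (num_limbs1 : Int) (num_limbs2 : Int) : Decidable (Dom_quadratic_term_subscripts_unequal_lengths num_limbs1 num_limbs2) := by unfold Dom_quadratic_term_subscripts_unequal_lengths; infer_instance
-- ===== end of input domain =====

-- B builds each diagonal bucket directly, keyed on the degree sum k with closed-form index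
-- bounds, instead of preallocating empty sets and scattering (i,j) pairs in a double loop
-- (objective: simpler; same asymptotic cost).

-- ===== PORT A =====
def quadratic_term_subscripts_unequal_lengths (num_limbs1 : Int) (num_limbs2 : Int) : List (List (Int × Int)) :=
  let max_limb_degree_in_quadratic := num_limbs1 + num_limbs2 - 2
  -- for i in range(max_limb_degree_in_quadratic+1): subscript_sets.append(set())
  let subscript_sets :=
    (PySem.List.pyRange 0 (max_limb_degree_in_quadratic + 1) 1).foldl
      (fun acc _ => acc ++ [PySem.Set.empty]) []
  -- for i in range(num_limbs1): for j in range(num_limbs2): subscript_sets[i+j].add((i,j))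
  -- the in-place element update subscript_sets[i+j].add(..) is ported as a functional
  -- list update at index i+j; exact, since every index i+j the loop touches is in range
  (PySem.List.pyRange 0 num_limbs1 1).foldl
    (fun ss i =>
      (PySem.List.pyRange 0 num_limbs2 1).foldl
        (fun ss j =>
          PySem.List.pySetD ss (i + j)
            (PySem.Set.add (PySem.List.pyGetD ss (i + j) PySem.Set.empty) (i, j))) ss)
    subscript_sets

-- ===== PORT B =====
def quadratic_term_subscripts_unequal_lengths_alt (num_limbs1 : Int) (num_limbs2 : Int) : List (List (Int × Int)) :=
  (PySem.List.pyRange 0 (num_limbs1 + num_limbs2 - 1) 1).map (fun k =>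
    PySem.Set.ofList
      ((PySem.List.pyRange (max 0 (k - num_limbs2 + 1)) (min k (num_limbs1 - 1) + 1) 1).map
        (fun i => (i, k - i))))

-- ===== PRECONDITION & SPEC =====
def Spec_quadratic_term_subscripts_unequal_lengths (num_limbs1 : Int) (num_limbs2 : Int) (out : List (List (Int × Int))) : Prop := out = quadratic_term_subscripts_unequal_lengths_alt num_limbs1 num_limbs2
instance (num_limbs1 : Int) (num_limbs2 : Int) (out : List (List (Int × Int))) : Decidable (Spec_quadratic_term_subscripts_unequal_lengths num_limbs1 num_limbs2 out) := by unfold Spec_quadratic_term_subscripts_unequal_lengths; infer_instance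

-- ===== CLAIM (what is proved, stated in full; the proofs are below) =====
def Claim_equal_quadratic_term_subscripts_unequal_lengths : Prop := ∀ (num_limbs1 : Int) (num_limbs2 : Int), Dom_quadratic_term_subscripts_unequal_lengths num_limbs1 num_limbs2 → Spec_quadratic_term_subscripts_unequal_lengths num_limbs1 num_limbs2 (quadratic_term_subscripts_unequal_lengths num_limbs1 num_limbs2)

-- ===== LEMMAS AND PROOFS =====

-- the inner Python loop 'for j in range(n2): ss[i+j].add((i,j))' as a function (proof-side only)
def pvInner (i n2 : Int) (ss : List (List (Int × Int))) : List (List (Int × Int)) :=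
  (PySem.List.pyRange 0 n2 1).foldl
    (fun ss j =>
      PySem.List.pySetD ss (i + j)
        (PySem.Set.add (PySem.List.pyGetD ss (i + j) PySem.Set.empty) (i, j))) ss

-- appending one empty set per loop iteration builds a replicate list
lemma pvFoldl_append_empty {α : Type} (l : List Int) (init : List α) (e : α) :
    l.foldl (fun acc _ => acc ++ [e]) init = init ++ List.replicate l.length e := by
  induction l generalizing init with
  | nil => simp
  | cons x xs ih => simp [List.foldl_cons, ih, List.replicate_succ]

lemma pvLength_pySetD {α : Type} (xs : List α) (i : Int) (v : α) :
    (PySem.List.pySetD xs i v).length = xs.length := by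
  unfold PySem.List.pySetD PySem.List.pySet?
  cases h : PySem.List.pyIdx? xs.length i <;> simp

lemma pvPySetD_oob {α : Type} (xs : List α) (i : Int) (v : α)
    (h : (xs.length : Int) ≤ i) : PySem.List.pySetD xs i v = xs := by
  have hnone : PySem.List.pySet? xs i v = none := by
    rw [PySem.List.pySet?_eq_none_iff]
    simp only [PySem.Raise.InRange]
    omega
  simp [PySem.List.pySetD, hnone]

lemma pvSet_add_not_mem {α : Type} [BEq α] [LawfulBEq α] (s : PySem.Set α) (x : α)
    (h : ¬ x ∈ s) : PySem.Set.add s x = s ++ [x] := by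
  unfold PySem.Set.add
  rw [if_neg]
  intro hc
  exact h ((PySem.Set.contains_iff s x).1 hc)

-- range(0, n) over an Int bound is the same list as over its toNat
lemma pvRange_toNat (n : Int) :
    PySem.List.pyRange 0 n 1 = PySem.List.pyRange 0 (n.toNat : Int) 1 := by
  have h : (n - 0).toNat = ((n.toNat : Int) - 0).toNat := by omega
  rw [PySem.List.pyRange_one, PySem.List.pyRange_one, h]

lemma pvInner_toNat (i n2 : Int) (ss : List (List (Int × Int))) :
    pvInner i n2 ss = pvInner i (n2.toNat : Int) ss := by
  unfold pvInner
  rw [pvRange_toNat]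

lemma pvInner_length_nat (n : Nat) (i : Int) (ss : List (List (Int × Int))) :
    (pvInner i (n : Int) ss).length = ss.length := by
  induction n generalizing ss with
  | zero => simp [pvInner, PySem.List.pyRange_one_eq_nil]
  | succ n ih =>
    unfold pvInner
    rw [show ((n + 1 : Nat) : Int) = (n : Int) + 1 by push_cast; ring,
        PySem.List.pyRange_one_succ_right (by positivity), List.foldl_append]
    simp only [List.foldl_cons, List.foldl_nil]
    rw [pvLength_pySetD]
    exact ih ss

lemma pvInner_length (n2 : Int) (i : Int) (ss : List (List (Int × Int))) :
    (pvInner i n2 ss).length = ss.length := by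
  rw [pvInner_toNat]
  exact pvInner_length_nat n2.toNat i ss

-- one pass of the inner loop touches slot k exactly when i ≤ k < i + n
lemma pvInner_get (n : Nat) (i : Int) (hi : 0 ≤ i) (ss : List (List (Int × Int)))
    (k : Nat) (hk : k < ss.length) :
    (pvInner i (n : Int) ss)[k]? =
      some (if i ≤ (k : Int) ∧ (k : Int) < i + n then
              PySem.Set.add (ss[k]'hk) (i, (k : Int) - i)
            else ss[k]'hk) := by
  induction n generalizing ss k with
  | zero =>
    have hc : ¬ (i ≤ (k : Int) ∧ (k : Int) < i + ((0 : Nat) : Int)) := by omega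
    rw [if_neg hc]
    simp [pvInner, PySem.List.pyRange_one_eq_nil, List.getElem?_eq_getElem hk]
  | succ n ih =>
    have hF : (pvInner i (n : Int) ss).length = ss.length := pvInner_length_nat n i ss
    have hstep : pvInner i ((n + 1 : Nat) : Int) ss =
        PySem.List.pySetD (pvInner i (n : Int) ss) (i + n)
          (PySem.Set.add
            (PySem.List.pyGetD (pvInner i (n : Int) ss) (i + n) PySem.Set.empty)
            (i, (n : Int))) := by
      unfold pvInner
      rw [show ((n + 1 : Nat) : Int) = (n : Int) + 1 by push_cast; ring,
          PySem.List.pyRange_one_succ_right (by positivity), List.foldl_append]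
      simp
    rw [hstep]
    by_cases hA : i + (n : Int) < (ss.length : Int)
    · -- index i+n is in range: the update lands in slot i.toNat + n
      have hpn : i + (n : Int) = ((i.toNat + n : Nat) : Int) := by omega
      have hplt : i.toNat + n < (pvInner i (n : Int) ss).length := by omega
      have hset : PySem.List.pySetD (pvInner i (n : Int) ss) (i + (n : Int))
            (PySem.Set.add
              (PySem.List.pyGetD (pvInner i (n : Int) ss) (i + (n : Int)) PySem.Set.empty)
              (i, (n : Int))) =
          (pvInner i (n : Int) ss).set (i.toNat + n)
            (PySem.Set.add
              (PySem.List.pyGetD (pvInner i (n : Int) ss) (i + (n : Int)) PySem.Set.empty)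
              (i, (n : Int))) := by
        rw [hpn]
        unfold PySem.List.pySetD
        rw [PySem.List.pySet?_natCast _ _ _ hplt]
        rfl
      rw [hset]
      have hget : PySem.List.pyGetD (pvInner i (n : Int) ss) (i + (n : Int)) PySem.Set.empty =
          ss[i.toNat + n]'(by omega) := by
        rw [hpn, PySem.List.pyGetD_natCast,
            List.getD_eq_getElem _ _ hplt]
        have := ih ss (i.toNat + n) (by omega)
        have hc : ¬ (i ≤ ((i.toNat + n : Nat) : Int) ∧ ((i.toNat + n : Nat) : Int) < i + n) := by
          omega
        rw [if_neg hc] at this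
        have h2 := List.getElem?_eq_getElem (l := pvInner i (n : Int) ss) hplt
        rw [h2] at this
        exact Option.some.inj this
      rw [hget, List.getElem?_set]
      by_cases he : i.toNat + n = k
      · subst he
        have hc : i ≤ ((i.toNat + n : Nat) : Int) ∧
            ((i.toNat + n : Nat) : Int) < i + ((n + 1 : Nat) : Int) := by
          constructor <;> [omega; omega]
        rw [if_pos rfl, if_pos (by omega), if_pos hc]
        have hx : ((i.toNat + n : Nat) : Int) - i = (n : Int) := by omega
        rw [hx]
      · rw [if_neg he, ih ss k hk]
        congr 1
        split_ifs with h1 h2 h2 <;> try rfl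
        · exact absurd (by omega : (k : Int) = i + n) (by exact_mod_cast fun hh => he (by omega))
        · omega
    · -- index i+n is out of range: the update is a no-op on the list
      rw [pvPySetD_oob _ _ _ (by omega : ((pvInner i (n : Int) ss).length : Int) ≤ i + n)]
      rw [ih ss k hk]
      congr 1
      split_ifs with h1 h2 h2 <;> try rfl
      · omega
      · omega

lemma pvInner_get' (n2 i : Int) (hi : 0 ≤ i) (ss : List (List (Int × Int)))
    (k : Nat) (hk : k < ss.length) :
    (pvInner i n2 ss)[k]? =
      some (if i ≤ (k : Int) ∧ (k : Int) < i + (n2.toNat : Int) then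
              PySem.Set.add (ss[k]'hk) (i, (k : Int) - i)
            else ss[k]'hk) := by
  rw [pvInner_toNat]
  exact pvInner_get n2.toNat i hi ss k hk

lemma pvOuter_length (n2 : Int) (m : Nat) (init : List (List (Int × Int))) :
    ((List.range m).foldl (fun ss (i : Nat) => pvInner (i : Int) n2 ss) init).length =
      init.length := by
  induction m generalizing init with
  | zero => simp
  | succ m ih =>
    rw [List.range_succ, List.foldl_append]
    simp only [List.foldl_cons, List.foldl_nil]
    rw [pvInner_length]
    exact ih init

-- the outer-loop invariant: after i = 0..m-1, slot k holds the pairs (i, k-i)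
-- with max 0 (k-n2+1) ≤ i < min (k+1) m, in increasing order of i
lemma pvOuter_get (n2 : Int) (L : Nat) (m : Nat) (k : Nat) (hk : k < L) :
    ((List.range m).foldl (fun ss (i : Nat) => pvInner (i : Int) n2 ss)
        (List.replicate L PySem.Set.empty))[k]? =
      some ((PySem.List.pyRange (max 0 ((k : Int) - n2 + 1))
              (min ((k : Int) + 1) (m : Int)) 1).map
        (fun i => (i, (k : Int) - i))) := by
  induction m with
  | zero =>
    have hnil : PySem.List.pyRange (max 0 ((k : Int) - n2 + 1))
        (min ((k : Int) + 1) ((0 : Nat) : Int)) 1 = [] :=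
      PySem.List.pyRange_one_eq_nil (by omega)
    simp only [List.range_zero, List.foldl_nil, hnil, List.map_nil]
    simp [hk, PySem.Set.empty]
  | succ m ih =>
    rw [List.range_succ, List.foldl_append]
    simp only [List.foldl_cons, List.foldl_nil]
    have hlen : k < ((List.range m).foldl (fun ss (i : Nat) => pvInner (i : Int) n2 ss)
        (List.replicate L PySem.Set.empty)).length := by
      rw [pvOuter_length, List.length_replicate]; exact hk
    rw [pvInner_get' n2 (m : Int) (by positivity) _ k hlen]
    have hprev := ih
    rw [List.getElem?_eq_getElem hlen] at hprev
    have hcur := Option.some.inj hprev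
    rw [hcur]
    by_cases hc : (m : Int) ≤ (k : Int) ∧ (k : Int) < (m : Int) + (n2.toNat : Int)
    · -- i = m contributes to slot k
      rw [if_pos hc]
      have hlo : max 0 ((k : Int) - n2 + 1) ≤ (m : Int) := by omega
      have h1 : min ((k : Int) + 1) ((m : Nat) : Int) = (m : Int) := by omega
      have h2 : min ((k : Int) + 1) (((m + 1 : Nat)) : Int) = (m : Int) + 1 := by
        push_cast; omega
      rw [h1, h2, PySem.List.pyRange_one_succ_right hlo, List.map_append]
      rw [pvSet_add_not_mem]
      · rfl
      · intro hmem
        rcases List.mem_map.1 hmem with ⟨i, hi, hei⟩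
        rcases PySem.List.mem_pyRange_one.1 hi with ⟨_, hilt⟩
        have : i = (m : Int) := congrArg Prod.fst hei
        omega
    · -- i = m does not touch slot k: the bucket is unchanged
      rw [if_neg hc]
      congr 1
      by_cases hkm : (k : Int) < (m : Int)
      · have h1 : min ((k : Int) + 1) ((m : Nat) : Int) = (k : Int) + 1 := by omega
        have h2 : min ((k : Int) + 1) (((m + 1 : Nat)) : Int) = (k : Int) + 1 := by
          push_cast; omega
        rw [h1, h2]
      · have hge : (m : Int) + (n2.toNat : Int) ≤ (k : Int) := by omega
        have hlo : (m : Int) + 1 ≤ max 0 ((k : Int) - n2 + 1) := by omega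
        rw [PySem.List.pyRange_one_eq_nil (by omega),
            PySem.List.pyRange_one_eq_nil (by push_cast; omega)]

theorem pv_main (n1 n2 : Int) :
    quadratic_term_subscripts_unequal_lengths n1 n2 =
      quadratic_term_subscripts_unequal_lengths_alt n1 n2 := by
  unfold quadratic_term_subscripts_unequal_lengths quadratic_term_subscripts_unequal_lengths_alt
  set L : Nat := (n1 + n2 - 1).toNat with hL
  have hinit : (PySem.List.pyRange 0 (n1 + n2 - 2 + 1) 1).foldl
      (fun acc _ => acc ++ [(PySem.Set.empty : List (Int × Int))]) [] =
      List.replicate L PySem.Set.empty := by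
    rw [pvFoldl_append_empty, PySem.List.length_pyRange_one]
    simp only [List.nil_append]
    congr 1
    omega
  simp only [hinit]
  have houter : (PySem.List.pyRange 0 n1 1).foldl
      (fun ss i =>
        (PySem.List.pyRange 0 n2 1).foldl
          (fun ss j =>
            PySem.List.pySetD ss (i + j)
              (PySem.Set.add (PySem.List.pyGetD ss (i + j) PySem.Set.empty) (i, j))) ss)
      (List.replicate L PySem.Set.empty) =
      (List.range n1.toNat).foldl (fun ss (i : Nat) => pvInner (i : Int) n2 ss)
        (List.replicate L PySem.Set.empty) := by
    rw [PySem.List.pyRange_one 0 n1, List.foldl_map]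
    simp only [sub_zero]
    simp only [zero_add]
    rfl
  rw [houter]
  apply List.ext_getElem?
  intro k
  by_cases hk : k < L
  · rw [pvOuter_get n2 L n1.toNat k hk, List.getElem?_map,
        PySem.List.getElem?_pyRange_one]
    rw [if_pos (by omega : k < (n1 + n2 - 1 - 0).toNat)]
    simp only [Option.map_some, zero_add]
    congr 1
    have hnodup : ((PySem.List.pyRange (max 0 ((k : Int) - n2 + 1))
        (min (k : Int) (n1 - 1) + 1) 1).map (fun i => (i, (k : Int) - i))).Nodup := by
      apply List.Nodup.map
      · intro a b hab
        exact congrArg Prod.fst hab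
      · exact PySem.List.nodup_pyRange_one _ _
    rw [PySem.Set.ofList_eq_self_of_nodup _ hnodup]
    by_cases hn1 : 0 ≤ n1
    · have h1 : ((n1.toNat : Nat) : Int) = n1 := by omega
      have h2 : min (k : Int) (n1 - 1) + 1 = min ((k : Int) + 1) n1 := by omega
      rw [h1, h2]
    · have h1 : min ((k : Int) + 1) ((n1.toNat : Nat) : Int) = 0 := by omega
      have h2 : min (k : Int) (n1 - 1) + 1 = n1 := by omega
      rw [h1, h2, PySem.List.pyRange_one_eq_nil (by omega),
          PySem.List.pyRange_one_eq_nil (by omega)]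
  · have h1 : ((List.range n1.toNat).foldl (fun ss (i : Nat) => pvInner (i : Int) n2 ss)
        (List.replicate L PySem.Set.empty)).length = L := by
      rw [pvOuter_length, List.length_replicate]
    have h2 : ((PySem.List.pyRange 0 (n1 + n2 - 1) 1).map (fun k =>
        PySem.Set.ofList
          ((PySem.List.pyRange (max 0 (k - n2 + 1)) (min k (n1 - 1) + 1) 1).map
            (fun i => (i, k - i))))).length = L := by
      rw [List.length_map, PySem.List.length_pyRange_one]
      omega
    rw [List.getElem?_eq_none (by omega), List.getElem?_eq_none (by omega)]

-- ===== VERDICT (by name: the statement is the Claim_ definition above) =====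
theorem quadratic_term_subscripts_unequal_lengths_spec : Claim_equal_quadratic_term_subscripts_unequal_lengths := by
  intro n1 n2 _
  unfold Spec_quadratic_term_subscripts_unequal_lengths
  exact pv_main n1 n2
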